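-- pv_equiv track=rewrite | github.com/ritikaslaptop/chatbotMVP--AshaAI | rag.py | _get_document_text
-- ===== SOURCE A (Python) =====
-- def _get_document_text(doc):
--     doc_type = doc.get('type', 'unknown')
--
--     if doc_type == 'job':
--         return f"Job: {doc.get('title', '')}. Company: {doc.get('company', '')}. Description: {doc.get('description', '')}. Location: {doc.get('location', '')}. Requirements: {doc.get('requirements', '')}"
--     elif doc_type == 'event':
--         return f"Event: {doc.get('title', '')}. Description: {doc.get('description', '')}. Date: {doc.get('date', '')}. Location: {doc.get('location', '')}"
--     elif doc_type == 'mentorship':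
--         return f"Mentorship: {doc.get('title', '')}. Mentor: {doc.get('mentor', '')}. Description: {doc.get('description', '')}. Expertise: {doc.get('expertise', '')}"
--     elif doc_type == 'session':
--         return f"Session: {doc.get('title', '')}. Description: {doc.get('description', '')}. Date: {doc.get('date', '')}. Time: {doc.get('time', '')}"
--     else:
--         return " ".join([f"{k}: {v}" for k, v in doc.items() if isinstance(v, str)]) #works
-- ===== SOURCE B (Python) =====
-- _TEMPLATES = {
--     'job': "Job: {title}. Company: {company}. Description: {description}. Location: {location}. Requirements: {requirements}",
--     'event': "Event: {title}. Description: {description}. Date: {date}. Location: {location}",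
--     'mentorship': "Mentorship: {title}. Mentor: {mentor}. Description: {description}. Expertise: {expertise}",
--     'session': "Session: {title}. Description: {description}. Date: {date}. Time: {time}",
-- }
--
--
-- def _get_document_text(doc):
--     template = _TEMPLATES.get(doc.get('type', 'unknown'))
--     if template is None:
--         return " ".join(f"{k}: {v}" for k, v in doc.items() if isinstance(v, str))
--     # interpret the template: copy literal chars, substitute {key} by doc.get(key, '')
--     out = []
--     i = 0
--     while i < len(template):
--         if template[i] == '{':
--             j = template.index('}', i)
--             out.append(doc.get(template[i + 1:j], ''))
--             i = j + 1
--         else: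
--             out.append(template[i])
--             i += 1
--     return "".join(out)
-- ===== Notes on version B (the rewrite author's own statement) =====
-- stated objective: alternative
-- what changed: Replaces A's five hardcoded if/elif f-string branches by a per-type template string and a small interpreter that scans the template character by character, substituting each {key} placeholder with doc.get(key, '').
import Mathlib
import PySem

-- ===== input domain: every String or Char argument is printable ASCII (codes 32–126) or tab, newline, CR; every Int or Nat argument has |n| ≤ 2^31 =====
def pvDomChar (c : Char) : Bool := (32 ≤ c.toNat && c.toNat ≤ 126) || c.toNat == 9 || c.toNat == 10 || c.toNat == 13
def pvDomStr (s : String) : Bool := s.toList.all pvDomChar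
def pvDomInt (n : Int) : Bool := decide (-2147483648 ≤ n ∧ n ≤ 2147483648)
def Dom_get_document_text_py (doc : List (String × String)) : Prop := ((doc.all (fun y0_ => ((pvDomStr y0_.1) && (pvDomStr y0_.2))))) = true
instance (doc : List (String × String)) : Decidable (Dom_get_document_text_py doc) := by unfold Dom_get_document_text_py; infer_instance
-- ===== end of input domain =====

-- B replaces A's five hardcoded if/elif f-string branches by a tiny template interpreter:
-- each known type maps to one template string and a scanner substitutes {key} by doc.get(key,'')
-- (objective: simpler/alternative). All values are strings by the type convention, so the
-- `isinstance(v, str)` filter in the fallback is always true and is ported as a map.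

-- ===== PORT A =====
def get_document_text_py (doc : List (String × String)) : String :=
  let d := PySem.Dict.mk doc
  let doc_type := PySem.Dict.getD d "type" "unknown"
  if doc_type == "job" then
    "Job: " ++ PySem.Dict.getD d "title" "" ++ ". Company: " ++ PySem.Dict.getD d "company" ""
      ++ ". Description: " ++ PySem.Dict.getD d "description" "" ++ ". Location: "
      ++ PySem.Dict.getD d "location" "" ++ ". Requirements: " ++ PySem.Dict.getD d "requirements" ""
  else if doc_type == "event" then
    "Event: " ++ PySem.Dict.getD d "title" "" ++ ". Description: " ++ PySem.Dict.getD d "description" ""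
      ++ ". Date: " ++ PySem.Dict.getD d "date" "" ++ ". Location: " ++ PySem.Dict.getD d "location" ""
  else if doc_type == "mentorship" then
    "Mentorship: " ++ PySem.Dict.getD d "title" "" ++ ". Mentor: " ++ PySem.Dict.getD d "mentor" ""
      ++ ". Description: " ++ PySem.Dict.getD d "description" "" ++ ". Expertise: " ++ PySem.Dict.getD d "expertise" ""
  else if doc_type == "session" then
    "Session: " ++ PySem.Dict.getD d "title" "" ++ ". Description: " ++ PySem.Dict.getD d "description" ""
      ++ ". Date: " ++ PySem.Dict.getD d "date" "" ++ ". Time: " ++ PySem.Dict.getD d "time" ""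
  else
    PySem.Str.join " " (d.items.map (fun kv => kv.1 ++ ": " ++ kv.2))

-- ===== PORT B =====
-- the _TEMPLATES table of Source B
def pvTemplates : PySem.Dict String String :=
  PySem.Dict.mk
    [ ("job", "Job: {title}. Company: {company}. Description: {description}. Location: {location}. Requirements: {requirements}"),
      ("event", "Event: {title}. Description: {description}. Date: {date}. Location: {location}"),
      ("mentorship", "Mentorship: {title}. Mentor: {mentor}. Description: {description}. Expertise: {expertise}"),
      ("session", "Session: {title}. Description: {description}. Date: {date}. Time: {time}") ]

-- Source B's while-loop scanner over the template, as structural recursion on the char list: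
-- a literal char is copied; at '{' the chars up to '}' are the key, doc.get(key,'') is emitted.
def pvRender (d : PySem.Dict String String) : List Char → List Char
  | [] => []
  | c :: rest =>
      if c = '{' then
        (PySem.Dict.getD d (String.ofList (rest.takeWhile (fun x => x ≠ '}'))) "").toList
          ++ pvRender d ((rest.dropWhile (fun x => x ≠ '}')).drop 1)
      else c :: pvRender d rest
termination_by l => l.length
decreasing_by
  · have h2 : (rest.dropWhile (fun x => x ≠ '}')).length ≤ rest.length := List.length_dropWhile_le _ _
    simp only [List.length_drop, List.length_cons]
    omega
  · simp

def get_document_text_py_alt (doc : List (String × String)) : String :=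
  let d := PySem.Dict.mk doc
  match PySem.Dict.get? pvTemplates (PySem.Dict.getD d "type" "unknown") with
  | some t => String.ofList (pvRender d t.toList)
  | none => PySem.Str.join " " (d.items.map (fun kv => kv.1 ++ ": " ++ kv.2))

-- ===== PRECONDITION & SPEC =====
def Spec_get_document_text_py (doc : List (String × String)) (out : String) : Prop := out = get_document_text_py_alt doc
instance (doc : List (String × String)) (out : String) : Decidable (Spec_get_document_text_py doc out) := by unfold Spec_get_document_text_py; infer_instance

-- ===== CLAIM (what is proved, stated in full; the proofs are below) =====
def Claim_equal_get_document_text_py : Prop := ∀ (doc : List (String × String)), Dom_get_document_text_py doc → Spec_get_document_text_py doc (get_document_text_py doc)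

-- ===== LEMMAS AND PROOFS =====
lemma str_ext_of_toList {s t : String} (h : s.toList = t.toList) : s = t := by
  rw [← @String.ofList_toList s, ← @String.ofList_toList t, h]

-- ===== VERDICT (by name: the statement is the Claim_ definition above) =====
theorem get_document_text_py_spec : Claim_equal_get_document_text_py := by
  intro doc _
  unfold Spec_get_document_text_py get_document_text_py get_document_text_py_alt
  by_cases h1 : PySem.Dict.getD (PySem.Dict.mk doc) "type" "unknown" = "job"
  · apply str_ext_of_toList
    simp [h1, pvTemplates, PySem.Dict.get?_mk_cons, pvRender, show String.ofList ['c', 'o', 'm', 'p', 'a', 'n', 'y'] = "company" from rfl, show String.ofList ['d', 'e', 's', 'c', 'r', 'i', 'p', 't', 'i', 'o', 'n'] = "description" from rfl, show String.ofList ['l', 'o', 'c', 'a', 't', 'i', 'o', 'n'] = "location" from rfl, show String.ofList ['r', 'e', 'q', 'u', 'i', 'r', 'e', 'm', 'e', 'n', 't', 's'] = "requirements" from rfl, show String.ofList ['t', 'i', 't', 'l', 'e'] = "title" from rfl]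
  · by_cases h2 : PySem.Dict.getD (PySem.Dict.mk doc) "type" "unknown" = "event"
    · apply str_ext_of_toList
      simp [h2, pvTemplates, PySem.Dict.get?_mk_cons, pvRender, show String.ofList ['d', 'a', 't', 'e'] = "date" from rfl, show String.ofList ['d', 'e', 's', 'c', 'r', 'i', 'p', 't', 'i', 'o', 'n'] = "description" from rfl, show String.ofList ['l', 'o', 'c', 'a', 't', 'i', 'o', 'n'] = "location" from rfl, show String.ofList ['t', 'i', 't', 'l', 'e'] = "title" from rfl]
    · by_cases h3 : PySem.Dict.getD (PySem.Dict.mk doc) "type" "unknown" = "mentorship"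
      · apply str_ext_of_toList
        simp [h3, pvTemplates, PySem.Dict.get?_mk_cons, pvRender, show String.ofList ['d', 'e', 's', 'c', 'r', 'i', 'p', 't', 'i', 'o', 'n'] = "description" from rfl, show String.ofList ['e', 'x', 'p', 'e', 'r', 't', 'i', 's', 'e'] = "expertise" from rfl, show String.ofList ['m', 'e', 'n', 't', 'o', 'r'] = "mentor" from rfl, show String.ofList ['t', 'i', 't', 'l', 'e'] = "title" from rfl]
      · by_cases h4 : PySem.Dict.getD (PySem.Dict.mk doc) "type" "unknown" = "session"
        · apply str_ext_of_toList
          simp [h4, pvTemplates, PySem.Dict.get?_mk_cons, pvRender, show String.ofList ['d', 'a', 't', 'e'] = "date" from rfl, show String.ofList ['d', 'e', 's', 'c', 'r', 'i', 'p', 't', 'i', 'o', 'n'] = "description" from rfl, show String.ofList ['t', 'i', 'm', 'e'] = "time" from rfl, show String.ofList ['t', 'i', 't', 'l', 'e'] = "title" from rfl]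
        · simp [h1, h2, h3, h4, Ne.symm h1, Ne.symm h2, Ne.symm h3, Ne.symm h4,
            pvTemplates, PySem.Dict.get?]
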